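-- pv_equiv track=rewrite | github.com/gulucaptain/videoassembler | data/utils.py | split_cumsum
-- ===== SOURCE A (Python) =====
-- def split_cumsum(group_sizes, split_num):
--     r, s = [], 0
--     for split in range(split_num):
--         chunk_sizes = [x // split_num for x in group_sizes]
--         if split == split_num - 1:
--             chunk_sizes = [chunk_sizes[i] + group_sizes[i] % split_num
--                            for i in range(len(group_sizes))]
--         for chunk_size in chunk_sizes:
--             r.append(chunk_size + s)
--             s += chunk_size
--     return r
-- ===== SOURCE B (Python) =====
-- def split_cumsum(group_sizes, split_num):
--     if split_num <= 0:
--         return []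
--     # Inclusive prefix sums of the base chunks, computed once.
--     pre, t = [], 0
--     for x in group_sizes:
--         t += x // split_num
--         pre.append(t)
--     total = t
--     # Every split but the last is `pre` shifted by a closed-form block offset.
--     out = [s * total + q for s in range(split_num - 1) for q in pre]
--     # Last split: same shifted prefix sums plus the running remainder sums.
--     rt = 0
--     for x, q in zip(group_sizes, pre):
--         rt += x % split_num
--         out.append((split_num - 1) * total + q + rt)
--     return out
-- ===== Notes on version B (the rewrite author's own statement) =====
-- stated objective: alternative
-- what changed: B replaces A's single running accumulator over all split_num*len blocks with a closed-form block construction: it computes the inclusive prefix sums of the base chunks once, emits every non-last block as that prefix list shifted by the closed-form offset s*total, and handles the last block by adding a running remainder prefix sum, so no accumulator is carried across blocks.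
import Mathlib
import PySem

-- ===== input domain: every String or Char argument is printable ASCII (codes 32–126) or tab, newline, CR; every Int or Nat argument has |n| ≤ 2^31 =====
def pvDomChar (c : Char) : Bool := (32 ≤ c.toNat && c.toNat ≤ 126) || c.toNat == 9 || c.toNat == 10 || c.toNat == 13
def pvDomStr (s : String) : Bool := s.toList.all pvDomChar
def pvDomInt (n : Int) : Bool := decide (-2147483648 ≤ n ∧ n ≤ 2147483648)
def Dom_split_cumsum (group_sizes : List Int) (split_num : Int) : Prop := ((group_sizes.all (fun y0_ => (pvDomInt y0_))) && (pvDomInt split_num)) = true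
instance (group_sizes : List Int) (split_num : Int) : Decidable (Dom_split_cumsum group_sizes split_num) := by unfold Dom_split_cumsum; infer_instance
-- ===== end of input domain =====

-- B computes the base-chunk prefix sums once and emits each non-last block as that list
-- shifted by the closed-form offset s*total (last block adds a running remainder prefix),
-- instead of A's single accumulator carried across all blocks; objective: alternative.

-- ===== PORT A =====
-- literal port of A: outer loop over range(split_num) carrying (r, s); the per-split chunk
-- list is rebuilt each iteration, and on the last split recomputed by index comprehension
-- (indices of range(len(group_sizes)) are always in range, so pyGetD's default is never used)
def split_cumsum (group_sizes : List Int) (split_num : Int) : List Int :=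
  ((PySem.List.pyRange 0 split_num 1).foldl
    (fun (p : List Int × Int) split =>
      let cs0 := group_sizes.map (fun x => PySem.Int.floordiv x split_num)
      let cs := if split = split_num - 1 then
          (PySem.List.pyRange 0 (group_sizes.length : Int) 1).map
            (fun i => PySem.List.pyGetD cs0 i 0
                      + PySem.Int.mod (PySem.List.pyGetD group_sizes i 0) split_num)
        else cs0
      cs.foldl (fun (q : List Int × Int) c => (q.1 ++ [c + q.2], q.2 + c)) p)
    ([], 0)).1

-- ===== PORT B =====
-- literal port of Source B: prefix-sum loop (pre, t) over group_sizes; the non-last blocks by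
-- the closed-form comprehension over range(split_num - 1); the last block by the
-- remainder-prefix loop over zip(group_sizes, pre)
def split_cumsum_alt (group_sizes : List Int) (split_num : Int) : List Int :=
  if split_num ≤ 0 then []
  else
    let pt := group_sizes.foldl
      (fun (p : List Int × Int) x =>
        (p.1 ++ [p.2 + PySem.Int.floordiv x split_num], p.2 + PySem.Int.floordiv x split_num))
      ([], 0)
    let pre := pt.1
    let total := pt.2
    let out1 := (PySem.List.pyRange 0 (split_num - 1) 1).flatMap
      (fun s => pre.map (fun q => s * total + q))
    let out2 := ((group_sizes.zip pre).foldl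
      (fun (p : List Int × Int) xq =>
        (p.1 ++ [(split_num - 1) * total + xq.2 + (p.2 + PySem.Int.mod xq.1 split_num)],
         p.2 + PySem.Int.mod xq.1 split_num))
      ([], 0)).1
    out1 ++ out2

-- ===== PRECONDITION & SPEC =====
def Spec_split_cumsum (group_sizes : List Int) (split_num : Int) (out : List Int) : Prop := out = split_cumsum_alt group_sizes split_num
instance (group_sizes : List Int) (split_num : Int) (out : List Int) : Decidable (Spec_split_cumsum group_sizes split_num out) := by unfold Spec_split_cumsum; infer_instance

-- ===== CLAIM (what is proved, stated in full; the proofs are below) =====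
def Claim_equal_split_cumsum : Prop := ∀ (group_sizes : List Int) (split_num : Int), Dom_split_cumsum group_sizes split_num → Spec_split_cumsum group_sizes split_num (split_cumsum group_sizes split_num)

-- ===== LEMMAS AND PROOFS =====

/-- Inclusive prefix sums of `cs` starting from running total `s`. -/
def pacc (s : Int) : List Int → List Int
  | [] => []
  | c :: cs => (s + c) :: pacc (s + c) cs

theorem pacc_append (xs ys : List Int) (s : Int) :
    pacc s (xs ++ ys) = pacc s xs ++ pacc (s + xs.sum) ys := by
  induction xs generalizing s with
  | nil => simp [pacc]
  | cons c cs ih => simp [pacc, ih, add_assoc]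

theorem pacc_shift (a b : Int) (cs : List Int) :
    pacc (a + b) cs = (pacc b cs).map (fun q => a + q) := by
  induction cs generalizing b with
  | nil => simp [pacc]
  | cons c cs ih => simp [pacc, add_assoc, ih]

theorem foldlA (cs : List Int) (r : List Int) (s : Int) :
    cs.foldl (fun (q : List Int × Int) c => (q.1 ++ [c + q.2], q.2 + c)) (r, s)
      = (r ++ pacc s cs, s + cs.sum) := by
  induction cs generalizing r s with
  | nil => simp [pacc]
  | cons c cs ih => simp [pacc, ih, add_assoc, add_comm c]

theorem preFold (f : Int → Int) (gs : List Int) (r : List Int) (s : Int) :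
    gs.foldl (fun (p : List Int × Int) x => (p.1 ++ [p.2 + f x], p.2 + f x)) (r, s)
      = (r ++ pacc s (gs.map f), s + (gs.map f).sum) := by
  induction gs generalizing r s with
  | nil => simp [pacc]
  | cons x xs ih => simp [pacc, ih, add_assoc]

theorem outerA (L : List Int) (g : Int → List Int) (r : List Int) (s : Int) :
    L.foldl (fun (p : List Int × Int) split =>
        (g split).foldl (fun (q : List Int × Int) c => (q.1 ++ [c + q.2], q.2 + c)) p) (r, s)
      = (r ++ pacc s (L.flatMap g), s + (L.flatMap g).sum) := by
  induction L generalizing r s with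
  | nil => simp [pacc]
  | cons a L ih => simp [foldlA, ih, pacc_append, add_assoc]

/-- the index comprehension of A's last split equals a direct map over the list -/
theorem comprehension_eq (gs : List Int) (f h : Int → Int) :
    (PySem.List.pyRange 0 (gs.length : Int) 1).map
        (fun i => PySem.List.pyGetD (gs.map f) i 0 + h (PySem.List.pyGetD gs i 0))
      = gs.map (fun x => f x + h x) := by
  rw [PySem.List.pyRange_one]
  apply List.ext_getElem
  · simp
  · intro k h1 h2
    simp only [List.getElem_map, List.getElem_range, zero_add]
    have hk : k < gs.length := by simpa using h2
    rw [PySem.List.pyGetD_natCast, PySem.List.pyGetD_natCast,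
        List.getD_eq_getElem _ _ (by simpa using hk), List.getD_eq_getElem _ _ hk]
    simp

theorem chunk_fun_eq (gs : List Int) (n split : Int) :
    (if split = n - 1 then
        (PySem.List.pyRange 0 (gs.length : Int) 1).map
          (fun i => PySem.List.pyGetD (gs.map (fun x => PySem.Int.floordiv x n)) i 0
                    + PySem.Int.mod (PySem.List.pyGetD gs i 0) n)
      else gs.map (fun x => PySem.Int.floordiv x n))
    = gs.map (fun x => PySem.Int.floordiv x n
              + (if split = n - 1 then PySem.Int.mod x n else 0)) := by
  by_cases hsp : split = n - 1
  · simp [hsp, comprehension_eq gs (fun x => PySem.Int.floordiv x n) (fun x => PySem.Int.mod x n)]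
  · simp [hsp]

theorem flatMap_const {α β : Type} (L : List α) (base : List β) :
    L.flatMap (fun _ => base) = (List.replicate L.length base).flatten := by
  induction L with
  | nil => simp
  | cons a L ih => simp [ih, List.replicate_succ]

/-- the flat chunk list of A (after `chunk_fun_eq`) -/
theorem flat_chunks_eq (gs : List Int) (n : Int) (hn : 0 < n) :
    (PySem.List.pyRange 0 n 1).flatMap
        (fun split => gs.map (fun x => PySem.Int.floordiv x n
            + (if split = n - 1 then PySem.Int.mod x n else 0)))
      = (List.replicate (n - 1).toNat (gs.map (fun x => PySem.Int.floordiv x n))).flatten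
        ++ gs.map (fun x => PySem.Int.floordiv x n + PySem.Int.mod x n) := by
  rw [PySem.List.pyRange_one_append 0 (n - 1) n (by omega) (by omega),
      PySem.List.pyRange_one_cons (show n - 1 < n by omega),
      PySem.List.pyRange_one_eq_nil (show n ≤ n - 1 + 1 by omega),
      List.flatMap_append]
  congr 1
  · rw [show (PySem.List.pyRange 0 (n - 1) 1).flatMap
          (fun split => gs.map (fun x => PySem.Int.floordiv x n
              + (if split = n - 1 then PySem.Int.mod x n else 0)))
        = (PySem.List.pyRange 0 (n - 1) 1).flatMap
          (fun _ => gs.map (fun x => PySem.Int.floordiv x n)) from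
      List.flatMap_congr (fun split hs => by
        have h2 := (PySem.List.mem_pyRange_one.mp hs).2
        have hne : split ≠ n - 1 := by omega
        simp [hne])]
    rw [flatMap_const, PySem.List.length_pyRange_one]
    congr 2
    omega
  · simp

theorem sum_flatten_replicate (k : Nat) (base : List Int) :
    ((List.replicate k base).flatten).sum = (k : Int) * base.sum := by
  induction k with
  | zero => simp
  | succ k ih =>
      simp only [List.replicate_succ, List.flatten_cons, List.sum_append, ih]
      push_cast
      ring

/-- prefix sums of k repeated copies of `base` are the prefix sums of `base`,
    block j shifted by the closed-form offset j * base.sum -/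
theorem pacc_flatten_replicate (base : List Int) (k : Nat) (t : Int) :
    pacc t ((List.replicate k base).flatten)
      = (List.range k).flatMap (fun (j : Nat) => (pacc 0 base).map (fun q => t + (j : Int) * base.sum + q)) := by
  induction k generalizing t with
  | zero => simp [pacc]
  | succ k ih =>
      rw [List.range_succ, List.replicate_succ', List.flatten_append, pacc_append, ih,
        List.flatMap_append, sum_flatten_replicate]
      congr 1
      simp only [List.flatMap_cons, List.flatMap_nil, List.append_nil, List.flatten_cons,
        List.flatten_nil, List.append_nil]
      rw [show t + (k : Int) * base.sum = (t + (k : Int) * base.sum) + 0 by ring, pacc_shift]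
      simp

/-- B's last-block loop over zip(gs, prefix sums) computes shifted prefix sums of f+h -/
theorem out2_fold (f h : Int → Int) (C : Int) (gs : List Int) :
    ∀ (qa rt : Int) (acc : List Int),
    ((gs.zip (pacc qa (gs.map f))).foldl
        (fun (p : List Int × Int) xq =>
          (p.1 ++ [C + xq.2 + (p.2 + h xq.1)], p.2 + h xq.1))
        (acc, rt)).1
      = acc ++ pacc (C + qa + rt) (gs.map fun x => f x + h x) := by
  induction gs with
  | nil => intro qa rt acc; simp [pacc]
  | cons x xs ih =>
      intro qa rt acc
      simp only [List.map_cons, pacc, List.zip_cons_cons, List.foldl_cons]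
      rw [ih (qa + f x) (rt + h x)]
      have e : C + (qa + f x) + (rt + h x) = C + qa + rt + (f x + h x) := by ring
      rw [e]
      simp

-- ===== VERDICT (by name: the statement is the Claim_ definition above) =====
theorem split_cumsum_spec : Claim_equal_split_cumsum := by
  intro gs n _
  unfold Spec_split_cumsum split_cumsum split_cumsum_alt
  by_cases hn : n ≤ 0
  · rw [if_pos hn, PySem.List.pyRange_one_eq_nil hn]
    simp
  · rw [if_neg hn]
    simp only [outerA, preFold, List.nil_append, zero_add]
    rw [show (PySem.List.pyRange 0 n 1).flatMap
          (fun split =>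
            if split = n - 1 then
              (PySem.List.pyRange 0 (gs.length : Int) 1).map
                (fun i => PySem.List.pyGetD (gs.map (fun x => PySem.Int.floordiv x n)) i 0
                          + PySem.Int.mod (PySem.List.pyGetD gs i 0) n)
            else gs.map (fun x => PySem.Int.floordiv x n))
        = (PySem.List.pyRange 0 n 1).flatMap
          (fun split => gs.map (fun x => PySem.Int.floordiv x n
              + (if split = n - 1 then PySem.Int.mod x n else 0))) from
      List.flatMap_congr (fun split _ => chunk_fun_eq gs n split)]
    rw [flat_chunks_eq gs n (by omega)]
    rw [pacc_append, sum_flatten_replicate, pacc_flatten_replicate,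
        PySem.List.pyRange_one 0 (n - 1),
        out2_fold (fun x => PySem.Int.floordiv x n) (fun x => PySem.Int.mod x n)
          ((n - 1) * (gs.map (fun x => PySem.Int.floordiv x n)).sum) gs 0 0 []]
    have ht : (((n - 1).toNat : Int)) = n - 1 := Int.toNat_of_nonneg (by omega)
    simp only [zero_add, add_zero, sub_zero, List.flatMap_map, ht, List.nil_append]
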